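-- pv_equiv track=rewrite | github.com/martinmj4im/Cool-Python-Projects- | ETS_PROJECT/projectMJ_MS2.py | create_routes_dict
-- ===== SOURCE A (Python) =====
-- def create_routes_dict(data):
--     '''
--     This expects  data list, which is a list of strings corresponding to each
--     line in the file, It skips the first line, and returns a dictionary of
--     <key, value> pairs, with key = value before the first comma, and a
--     list a list of strings consisting of the unique element after the 6th comma
--     from every line starting with the same key; ex.:
--       { '1'  : ["1-30-1", "1-32-1"," 1-31-1"...]
--         '113': [113-22-1, 113-24-1, 113-23-1' ... ]
--     '''
--     routes = {}   # to be returned: routes dict shown above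
--
--     for line in data:
--
--         line = line.strip()
--         strpd_line = line.split(",")
--         route = strpd_line[0]
--         shape_ID = strpd_line[-1]
--         if route not in routes:
--             routes[route] = [shape_ID]
--         else:
--             if shape_ID not in routes[route]:
--                 routes[route].append(shape_ID)
--
--
--     return routes
-- ===== SOURCE B (Python) =====
-- def create_routes_dict(data):
--     # Two passes: (1) group every line's last comma-field per first field,
--     # keeping duplicates; (2) dedup each group preserving first-occurrence order.
--     grouped = {}
--     for line in data:
--         fields = line.strip().split(",")
--         grouped.setdefault(fields[0], []).append(fields[-1])
--     return {route: list(dict.fromkeys(ids)) for route, ids in grouped.items()}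
-- ===== Notes on version B (the rewrite author's own statement) =====
-- stated objective: alternative
-- what changed: A's single loop with an inline membership-test dedup is replaced by a branch-free grouping pass (setdefault+append, duplicates kept) followed by a separate dedup pass using dict.fromkeys on each group.
import Mathlib
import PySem

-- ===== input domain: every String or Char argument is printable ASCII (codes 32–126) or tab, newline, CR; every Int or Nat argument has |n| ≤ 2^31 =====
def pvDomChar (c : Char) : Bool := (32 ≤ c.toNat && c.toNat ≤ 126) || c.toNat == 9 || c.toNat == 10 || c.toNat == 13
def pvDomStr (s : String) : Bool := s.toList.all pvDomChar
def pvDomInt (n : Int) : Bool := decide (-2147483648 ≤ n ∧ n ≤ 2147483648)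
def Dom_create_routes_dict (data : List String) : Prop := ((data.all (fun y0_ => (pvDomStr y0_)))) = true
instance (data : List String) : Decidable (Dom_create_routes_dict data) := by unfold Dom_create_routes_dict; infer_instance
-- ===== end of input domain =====

-- B replaces A's single inline-dedup loop by a branch-free grouping pass followed by a
-- separate per-group dedup pass (alternative decomposition, same cost).
set_option maxHeartbeats 1000000


-- ===== PORT A =====
-- line.strip().split(",") — split? is some since the separator "," is non-empty,
-- and the result is non-empty, so the [0]/[-1] lookups never raise: the getD
-- defaults below are unreachable.
def pvStepA (routes : PySem.Dict String (List String)) (line : String) :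
    PySem.Dict String (List String) :=
  let strpd_line := (PySem.Str.split? (PySem.Str.strip line) ",").getD []
  let route := (PySem.List.pyGet? strpd_line 0).getD ""
  let shape_ID := (PySem.List.pyGet? strpd_line (-1)).getD ""
  if ¬ routes.contains route then
    routes.insert route [shape_ID]
  else
    if ¬ (routes.getD route []).contains shape_ID then
      routes.insert route (routes.getD route [] ++ [shape_ID])
    else
      routes

def create_routes_dict (data : List String) : List (String × List String) :=
  (data.foldl pvStepA PySem.Dict.empty).items

-- ===== PORT B =====
def pvStepB (grouped : PySem.Dict String (List String)) (line : String) :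
    PySem.Dict String (List String) :=
  let fields := (PySem.Str.split? (PySem.Str.strip line) ",").getD []
  grouped.modify ((PySem.List.pyGet? fields 0).getD "") []
    (· ++ [(PySem.List.pyGet? fields (-1)).getD ""])

def create_routes_dict_alt (data : List String) : List (String × List String) :=
  let grouped := data.foldl pvStepB PySem.Dict.empty
  grouped.items.map (fun p => (p.1, PySem.List.dedup p.2))

-- ===== PRECONDITION & SPEC =====
def Spec_create_routes_dict (data : List String) (out : List (String × List String)) : Prop := out = create_routes_dict_alt data
instance (data : List String) (out : List (String × List String)) : Decidable (Spec_create_routes_dict data out) := by unfold Spec_create_routes_dict; infer_instance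

-- ===== CLAIM (what is proved, stated in full; the proofs are below) =====
def Claim_equal_create_routes_dict : Prop := ∀ (data : List String), Dom_create_routes_dict data → Spec_create_routes_dict data (create_routes_dict data)

-- ===== LEMMAS AND PROOFS =====

-- The key (field before the first comma) and value (last field) extracted from a line.
def pvKey (line : String) : String :=
  (PySem.List.pyGet? ((PySem.Str.split? (PySem.Str.strip line) ",").getD []) 0).getD ""

def pvVal (line : String) : String :=
  (PySem.List.pyGet? ((PySem.Str.split? (PySem.Str.strip line) ",").getD []) (-1)).getD ""

theorem pvStepA_def (dA : PySem.Dict String (List String)) (line : String) :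
    pvStepA dA line =
      (if ¬ dA.contains (pvKey line) then dA.insert (pvKey line) [pvVal line]
       else if ¬ (dA.getD (pvKey line) []).contains (pvVal line) then
         dA.insert (pvKey line) (dA.getD (pvKey line) [] ++ [pvVal line])
       else dA) := rfl

theorem pvStepB_def (dB : PySem.Dict String (List String)) (line : String) :
    pvStepB dB line = dB.modify (pvKey line) [] (· ++ [pvVal line]) := rfl

-- Invariant relating the two loop states: same keys (nodup) and A's stored list is
-- the ordered dedup of B's stored list, at every key.
def pvInv (dA dB : PySem.Dict String (List String)) : Prop :=
  dA.keys = dB.keys ∧ dB.keys.Nodup ∧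
    ∀ k, dA.getD k [] = PySem.List.dedup (dB.getD k [])

theorem pvInv_step (dA dB : PySem.Dict String (List String)) (line : String)
    (h : pvInv dA dB) : pvInv (pvStepA dA line) (pvStepB dB line) := by
  obtain ⟨hkeys, hnd, hval⟩ := h
  rw [pvStepA_def, pvStepB_def]
  set r := pvKey line with hr
  set v := pvVal line with hv
  have hcont : dA.contains r = dB.contains r := by
    rw [PySem.Dict.contains_eq_decide_mem_keys, PySem.Dict.contains_eq_decide_mem_keys, hkeys]
  have hkeysmod : (dB.modify r [] (· ++ [v])).keys = (dB.insert r (dB.getD r [] ++ [v])).keys :=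
    PySem.Dict.keys_modify dB r [] _
  have hndB : (dB.modify r [] (· ++ [v])).keys.Nodup := by
    rw [hkeysmod]; exact PySem.Dict.nodup_keys_insert _ _ _ hnd
  by_cases hc : dB.contains r = true
  · -- key already present in both
    have hcA : dA.contains r = true := by rw [hcont]; exact hc
    have hBkeys : (dB.modify r [] (· ++ [v])).keys = dB.keys := by
      rw [hkeysmod, PySem.Dict.keys_insert_of_contains _ _ hc]
    rw [if_neg (by simp [hcA])]
    by_cases hmem : v ∈ dA.getD r []
    · -- A does nothing; dedup absorbs the appended duplicate
      rw [if_neg (by simp [hmem])]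
      refine ⟨?_, hndB, ?_⟩
      · rw [hBkeys, hkeys]
      · intro k
        by_cases hk : k = r
        · subst hk
          rw [PySem.Dict.getD_modify_self, hval r, PySem.List.dedup_eq_ofList,
            PySem.List.dedup_eq_ofList, PySem.Set.ofList_append_singleton]
          have hvmem : v ∈ PySem.Set.ofList (dB.getD r []) := by
            rw [← PySem.List.dedup_eq_ofList, ← hval r]; exact hmem
          rw [PySem.Set.add_of_mem hvmem]
        · rw [PySem.Dict.getD_modify_of_ne _ _ _ hk, hval k]
    · -- A appends; dedup of B's appended list gains the same new element
      rw [if_pos (by simp [hmem])]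
      refine ⟨?_, hndB, ?_⟩
      · rw [hBkeys, PySem.Dict.keys_insert_of_contains _ _ hcA, hkeys]
      · intro k
        by_cases hk : k = r
        · subst hk
          rw [PySem.Dict.getD_insert_self, PySem.Dict.getD_modify_self, hval r,
            PySem.List.dedup_eq_ofList, PySem.List.dedup_eq_ofList,
            PySem.Set.ofList_append_singleton]
          have hvmem : v ∉ PySem.Set.ofList (dB.getD r []) := by
            rw [← PySem.List.dedup_eq_ofList, ← hval r]; exact hmem
          rw [PySem.Set.add_of_not_mem hvmem]
        · rw [PySem.Dict.getD_insert_of_ne _ _ _ hk,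
            PySem.Dict.getD_modify_of_ne _ _ _ hk, hval k]
  · -- fresh key in both
    have hc' : dB.contains r = false := by simpa using hc
    have hcA : dA.contains r = false := by rw [hcont]; exact hc'
    rw [if_pos (by simp [hcA])]
    refine ⟨?_, hndB, ?_⟩
    · rw [hkeysmod, PySem.Dict.keys_insert_of_not_contains _ _ hc',
        PySem.Dict.keys_insert_of_not_contains _ _ hcA, hkeys]
    · intro k
      by_cases hk : k = r
      · subst hk
        rw [PySem.Dict.getD_insert_self, PySem.Dict.getD_modify_self,
          PySem.Dict.getD_of_not_contains _ _ hc']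
        rfl
      · rw [PySem.Dict.getD_insert_of_ne _ _ _ hk,
          PySem.Dict.getD_modify_of_ne _ _ _ hk, hval k]

theorem pvInv_foldl (data : List String) (dA dB : PySem.Dict String (List String))
    (h : pvInv dA dB) : pvInv (data.foldl pvStepA dA) (data.foldl pvStepB dB) := by
  induction data generalizing dA dB with
  | nil => exact h
  | cons line rest ih => exact ih _ _ (pvInv_step dA dB line h)

-- ===== VERDICT (by name: the statement is the Claim_ definition above) =====
theorem create_routes_dict_spec : Claim_equal_create_routes_dict := by
  intro data _
  unfold Spec_create_routes_dict create_routes_dict create_routes_dict_alt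
  obtain ⟨hkeys, hnd, hval⟩ :=
    pvInv_foldl data PySem.Dict.empty PySem.Dict.empty
      ⟨rfl, by simp [PySem.Dict.keys_empty], fun k => by simp [PySem.Dict.getD_empty]⟩
  set dA := data.foldl pvStepA PySem.Dict.empty
  set dB := data.foldl pvStepB PySem.Dict.empty
  show dA.items = dB.items.map (fun p => (p.1, PySem.List.dedup p.2))
  rw [PySem.Dict.items_eq_map_keys dA (by rw [hkeys]; exact hnd) [],
    PySem.Dict.items_eq_map_keys dB hnd [], List.map_map, hkeys]
  exact List.map_congr_left fun k _ => by simp [Function.comp, hval k]
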